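-- pv_equiv track=rewrite | github.com/DacianGoina/ICS-copy | src/main/matching_utils.py | three_way_matching
-- ===== SOURCE A (Python) =====
-- def three_way_matching(m1_res_labels, m2_res_labels, m3_res_labels, m1_types, m2_types, m3_types):
--     '''
--     Three way matching (intersection) between the predicted labels provided by 3 distinct classification methods.
--     Parameters and return meanings are the same as in the case of two_way_matching, but adapted for 3 way matching.
--     '''
--     m1_normal_label, m1_anomalous_label = m1_types
--     m2_normal_label, m2_anomalous_label = m2_types
--     m3_normal_label, m3_anomalous_label = m3_types
--
--     normal_instances_matches = 0
--     anomalous_instances_matches = 0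
--     wrong_matches = 0
--     for l1_label, l2_label, l3_label in zip(m1_res_labels, m2_res_labels, m3_res_labels):
--         if l1_label == m1_normal_label and l2_label == m2_normal_label and l3_label == m3_normal_label:
--             normal_instances_matches += 1
--         elif l1_label == m1_anomalous_label and l2_label == m2_anomalous_label and l3_label == m3_anomalous_label:
--             anomalous_instances_matches += 1
--         else:
--             wrong_matches +=1
--
--     return (normal_instances_matches, anomalous_instances_matches, wrong_matches)
-- ===== SOURCE B (Python) =====
-- def three_way_matching(m1_res_labels, m2_res_labels, m3_res_labels, m1_types, m2_types, m3_types):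
--     # Tally every label triple in a frequency dict, then answer with two key lookups:
--     # the normal bucket is the multiplicity of the all-normal triple, the anomalous
--     # bucket the multiplicity of the all-anomalous triple (pop makes the normal key
--     # win when both keys coincide, like A's elif), everything else is wrong.
--     freq = {}
--     total = 0
--     for t in zip(m1_res_labels, m2_res_labels, m3_res_labels):
--         freq[t] = freq.get(t, 0) + 1
--         total += 1
--     normal = freq.pop((m1_types[0], m2_types[0], m3_types[0]), 0)
--     anomalous = freq.pop((m1_types[1], m2_types[1], m3_types[1]), 0)
--     return (normal, anomalous, total - normal - anomalous)
-- ===== Notes on version B (the rewrite author's own statement) =====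
-- stated objective: alternative
-- what changed: Replaced A's per-element if/elif/else classify-and-count loop by a different data structure: one pass builds a frequency dict of the label triples, then the normal and anomalous buckets are read off by two dict pops (pop after pop keeps A's elif precedence when the two keys coincide) and wrong is the remainder.
import Mathlib
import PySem

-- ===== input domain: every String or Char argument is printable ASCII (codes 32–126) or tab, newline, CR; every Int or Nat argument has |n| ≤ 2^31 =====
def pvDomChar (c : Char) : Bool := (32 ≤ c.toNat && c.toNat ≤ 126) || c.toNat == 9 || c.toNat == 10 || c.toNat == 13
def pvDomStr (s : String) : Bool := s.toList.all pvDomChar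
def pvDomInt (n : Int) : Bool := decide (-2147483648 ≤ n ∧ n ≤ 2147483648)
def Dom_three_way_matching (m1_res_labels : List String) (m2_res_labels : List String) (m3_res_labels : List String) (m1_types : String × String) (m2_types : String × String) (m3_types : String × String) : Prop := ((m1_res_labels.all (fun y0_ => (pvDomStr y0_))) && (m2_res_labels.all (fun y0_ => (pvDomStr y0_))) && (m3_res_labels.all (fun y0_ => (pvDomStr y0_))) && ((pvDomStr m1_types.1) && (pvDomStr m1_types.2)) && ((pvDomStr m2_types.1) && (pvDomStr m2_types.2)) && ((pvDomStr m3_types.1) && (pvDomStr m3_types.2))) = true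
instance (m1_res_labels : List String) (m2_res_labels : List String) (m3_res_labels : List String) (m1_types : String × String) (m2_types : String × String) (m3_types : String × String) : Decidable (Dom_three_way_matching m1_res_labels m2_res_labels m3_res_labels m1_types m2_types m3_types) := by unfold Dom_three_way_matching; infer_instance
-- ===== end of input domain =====

-- B replaces A's per-element if/elif/else classify-and-count loop by a frequency dict of the
-- label triples read off by two pops (objective: alternative; same asymptotic cost).

-- ===== PORT A =====
-- A: one pass over the zipped triples, carrying three counters through if/elif/else.
def three_way_matching (m1_res_labels : List String) (m2_res_labels : List String) (m3_res_labels : List String) (m1_types : String × String) (m2_types : String × String) (m3_types : String × String) : Int × Int × Int :=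
  let trips := m1_res_labels.zip (m2_res_labels.zip m3_res_labels)
  trips.foldl
    (fun (st : Int × Int × Int) t =>
      if t.1 = m1_types.1 ∧ t.2.1 = m2_types.1 ∧ t.2.2 = m3_types.1 then
        (st.1 + 1, st.2.1, st.2.2)
      else if t.1 = m1_types.2 ∧ t.2.1 = m2_types.2 ∧ t.2.2 = m3_types.2 then
        (st.1, st.2.1 + 1, st.2.2)
      else
        (st.1, st.2.1, st.2.2 + 1))
    (0, 0, 0)

-- ===== PORT B =====
-- freq.pop(k, 0): returns the stored value (default 0) and the dict without k.
def twmPopD (d : PySem.Dict (String × String × String) Int) (k : String × String × String) :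
    Int × PySem.Dict (String × String × String) Int :=
  match d.pop? k with
  | none => (0, d)
  | some p => p

-- B: build a frequency dict of the triples (counting the total), then pop the all-normal
-- key and the all-anomalous key; wrong is the remainder.
def three_way_matching_alt (m1_res_labels : List String) (m2_res_labels : List String) (m3_res_labels : List String) (m1_types : String × String) (m2_types : String × String) (m3_types : String × String) : Int × Int × Int :=
  let trips := m1_res_labels.zip (m2_res_labels.zip m3_res_labels)
  let ft := trips.foldl
    (fun (st : PySem.Dict (String × String × String) Int × Int) t =>
      (st.1.insert t (st.1.getD t 0 + 1), st.2 + 1))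
    (PySem.Dict.empty, 0)
  let p1 := twmPopD ft.1 (m1_types.1, m2_types.1, m3_types.1)
  let p2 := twmPopD p1.2 (m1_types.2, m2_types.2, m3_types.2)
  (p1.1, p2.1, ft.2 - p1.1 - p2.1)

-- ===== PRECONDITION & SPEC =====
def Spec_three_way_matching (m1_res_labels : List String) (m2_res_labels : List String) (m3_res_labels : List String) (m1_types : String × String) (m2_types : String × String) (m3_types : String × String) (out : Int × Int × Int) : Prop := out = three_way_matching_alt m1_res_labels m2_res_labels m3_res_labels m1_types m2_types m3_types
instance (m1_res_labels : List String) (m2_res_labels : List String) (m3_res_labels : List String) (m1_types : String × String) (m2_types : String × String) (m3_types : String × String) (out : Int × Int × Int) : Decidable (Spec_three_way_matching m1_res_labels m2_res_labels m3_res_labels m1_types m2_types m3_types out) := by unfold Spec_three_way_matching; infer_instance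

-- ===== CLAIM (what is proved, stated in full; the proofs are below) =====
def Claim_equal_three_way_matching : Prop := ∀ (m1_res_labels : List String) (m2_res_labels : List String) (m3_res_labels : List String) (m1_types : String × String) (m2_types : String × String) (m3_types : String × String), Dom_three_way_matching m1_res_labels m2_res_labels m3_res_labels m1_types m2_types m3_types → Spec_three_way_matching m1_res_labels m2_res_labels m3_res_labels m1_types m2_types m3_types (three_way_matching m1_res_labels m2_res_labels m3_res_labels m1_types m2_types m3_types)

-- ===== LEMMAS AND PROOFS =====

-- A's fused fold, from any accumulator, in closed form: counts of the two key triples (the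
-- anomalous key counting 0 when it coincides with the normal key — the elif) and the rest.
theorem twm_fold_eq (n1 n2 n3 a1 a2 a3 : String)
    (l : List (String × String × String)) (x y z : Int) :
    l.foldl
      (fun (st : Int × Int × Int) t =>
        if t.1 = n1 ∧ t.2.1 = n2 ∧ t.2.2 = n3 then
          (st.1 + 1, st.2.1, st.2.2)
        else if t.1 = a1 ∧ t.2.1 = a2 ∧ t.2.2 = a3 then
          (st.1, st.2.1 + 1, st.2.2)
        else
          (st.1, st.2.1, st.2.2 + 1))
      (x, y, z)
    = (x + l.count (n1, n2, n3),
       y + (if ((a1, a2, a3) : String × String × String) = (n1, n2, n3) then 0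
            else (l.count (a1, a2, a3) : Int)),
       z + ((l.length : Int) - l.count (n1, n2, n3)
          - (if ((a1, a2, a3) : String × String × String) = (n1, n2, n3) then 0
             else (l.count (a1, a2, a3) : Int)))) := by
  induction l generalizing x y z with
  | nil => simp
  | cons h tl ih =>
    have hsplit : (h.1 = n1 ∧ h.2.1 = n2 ∧ h.2.2 = n3) ↔ h = (n1, n2, n3) := by
      constructor
      · rintro ⟨ha, hb, hc⟩; exact Prod.ext ha (Prod.ext hb hc)
      · rintro rfl; exact ⟨rfl, rfl, rfl⟩
    have hsplit2 : (h.1 = a1 ∧ h.2.1 = a2 ∧ h.2.2 = a3) ↔ h = (a1, a2, a3) := by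
      constructor
      · rintro ⟨ha, hb, hc⟩; exact Prod.ext ha (Prod.ext hb hc)
      · rintro rfl; exact ⟨rfl, rfl, rfl⟩
    simp only [List.foldl_cons, List.count_cons]
    by_cases h1 : h = (n1, n2, n3)
    · rw [if_pos (hsplit.mpr h1), ih]
      by_cases hk : ((a1, a2, a3) : String × String × String) = (n1, n2, n3)
      · simp [h1, hk]; omega
      · have hk' : ¬ ((n1, n2, n3) : String × String × String) = (a1, a2, a3) :=
          fun c => hk c.symm
        simp [h1, hk, hk']; omega
    · rw [if_neg (fun c => h1 (hsplit.mp c))]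
      by_cases h2 : h = (a1, a2, a3)
      · have hk : ¬ ((a1, a2, a3) : String × String × String) = (n1, n2, n3) :=
          fun c => h1 (h2.trans c)
        rw [if_pos (hsplit2.mpr h2), ih]
        simp [h2, hk]; omega
      · rw [if_neg (fun c => h2 (hsplit2.mp c)), ih]
        by_cases hk : ((a1, a2, a3) : String × String × String) = (n1, n2, n3)
        · simp [h1, hk]; omega
        · simp [h1, h2, hk]; omega

-- B's counting fold, split into its dict and its running total.
theorem twm_pairfold (l : List (String × String × String))
    (d : PySem.Dict (String × String × String) Int) (c : Int) :
    l.foldl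
      (fun (st : PySem.Dict (String × String × String) Int × Int) t =>
        (st.1.insert t (st.1.getD t 0 + 1), st.2 + 1))
      (d, c)
    = (l.foldl (fun d t => d.insert t (d.getD t 0 + 1)) d, c + l.length) := by
  induction l generalizing d c with
  | nil => simp
  | cons h tl ih =>
    simp only [List.foldl_cons, List.length_cons]
    rw [ih]
    congr 1
    push_cast
    omega

-- get? after erase: the erased key reads none, every other key is untouched.
theorem twm_get?_erase (d : PySem.Dict (String × String × String) Int)
    (k1 k2 : String × String × String) :
    (d.erase k1).get? k2 = if k2 = k1 then none else d.get? k2 := by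
  rcases d with ⟨items⟩
  simp only [PySem.Dict.erase, PySem.Dict.get?]
  by_cases hk : k2 = k1
  · subst hk
    rw [if_pos rfl]
    have hnone : List.find? (fun p => p.1 == k2)
        (items.filter (fun p => !(p.1 == k2))) = none := by
      rw [List.find?_eq_none]
      intro x hx
      have := (List.mem_filter.mp hx).2
      simpa using this
    simp [hnone]
  · rw [if_neg hk]
    induction items with
    | nil => rfl
    | cons p rest ih =>
      by_cases hp : p.1 = k1
      · have hb : (!(p.1 == k1)) = false := by simp [hp]
        have h2 : (p.1 == k2) = false := by
          simp only [beq_eq_false_iff_ne, ne_eq, hp]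
          exact fun c => hk c.symm
        rw [List.filter_cons, hb, if_neg (by simp)]
        simp only [List.find?_cons, h2]
        exact ih
      · have hb : (!(p.1 == k1)) = true := by simp [hp]
        rw [List.filter_cons, hb, if_pos rfl]
        by_cases hq : (p.1 == k2) = true
        · simp only [List.find?_cons, hq]
        · have hq' : (p.1 == k2) = false := by simpa using hq
          simp only [List.find?_cons, hq']
          exact ih

-- pop with default 0 returns the stored count and the dict without the key.
theorem twm_popD_eq (d : PySem.Dict (String × String × String) Int)
    (k : String × String × String) :
    twmPopD d k = (d.getD k 0, d.erase k) := by
  unfold twmPopD PySem.Dict.pop?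
  cases hg : d.get? k with
  | none =>
    simp only [Option.map_none]
    have hc : d.contains k = false := (PySem.Dict.get?_eq_none_iff_contains d k).mp hg
    have he : d.erase k = d := by
      rcases d with ⟨items⟩
      simp only [PySem.Dict.erase]
      congr 1
      apply List.filter_eq_self.mpr
      intro p hp
      simp only [PySem.Dict.contains] at hc
      simp only [Bool.not_eq_eq_eq_not, Bool.not_true]
      have := List.any_eq_false.mp hc p hp
      simpa using this
    rw [PySem.Dict.getD_of_get?_eq_none d 0 hg, he]
  | some v =>
    simp only [Option.map_some]
    rw [PySem.Dict.getD_eq_get?_getD, hg]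
    rfl

-- ===== VERDICT (by name: the statement is the Claim_ definition above) =====
theorem three_way_matching_spec : Claim_equal_three_way_matching := by
  intro m1 m2 m3 t1 t2 t3 _
  simp only [Spec_three_way_matching, three_way_matching, three_way_matching_alt]
  conv_rhs => rw [twm_pairfold, PySem.Dict.foldl_insert_getD_add_one_eq_counter]
  simp only [twm_popD_eq, PySem.Dict.getD_counter]
  conv_rhs => rw [PySem.Dict.getD_eq_get?_getD, twm_get?_erase]
  conv_lhs => rw [twm_fold_eq]
  by_cases hk : ((t1.2, t2.2, t3.2) : String × String × String) = (t1.1, t2.1, t3.1)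
  · rw [if_pos hk, if_pos hk]
    simp only [Option.getD_none, Prod.mk.injEq]
    refine ⟨by omega, by omega, by omega⟩
  · rw [if_neg hk, if_neg hk, ← PySem.Dict.getD_eq_get?_getD, PySem.Dict.getD_counter]
    simp only [Prod.mk.injEq]
    refine ⟨by omega, by omega, by omega⟩
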